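-- pv_equiv track=rewrite | github.com/georshan-defsecone/DSEC360- | backend/DSEC/startScan/oracle/validate.py | extract_audit_id_from_json_name
-- ===== SOURCE A (Python) =====
-- def extract_audit_id_from_json_name(json_name):
--     parts = json_name.strip('_').split('_')
--     id_parts = []
--     for part in parts:
--         if part.isdigit():
--             id_parts.append(part)
--         else:
--             break
--     return '.'.join(id_parts) if len(id_parts) >= 2 else None
-- ===== SOURCE B (Python) =====
-- def extract_audit_id_from_json_name(json_name):
--     # Single character-level scan: accumulate digit runs separated by single
--     # underscores directly, instead of materializing a full split-token list.
--     tokens = []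
--     cur = ''
--     for ch in json_name.strip('_'):
--         if ch.isdigit():
--             cur += ch
--         elif ch == '_' and cur:
--             tokens.append(cur)
--             cur = ''
--         else:
--             cur = ''
--             break
--     if cur:
--         tokens.append(cur)
--     return '.'.join(tokens) if len(tokens) >= 2 else None
-- ===== Notes on version B (the rewrite author's own statement) =====
-- stated objective: alternative
-- what changed: Replaces strip/split-into-all-tokens plus a tokens-and-break loop by a single character-level scan that builds the leading digit tokens directly and never materializes the full split list.
import Mathlib
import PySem

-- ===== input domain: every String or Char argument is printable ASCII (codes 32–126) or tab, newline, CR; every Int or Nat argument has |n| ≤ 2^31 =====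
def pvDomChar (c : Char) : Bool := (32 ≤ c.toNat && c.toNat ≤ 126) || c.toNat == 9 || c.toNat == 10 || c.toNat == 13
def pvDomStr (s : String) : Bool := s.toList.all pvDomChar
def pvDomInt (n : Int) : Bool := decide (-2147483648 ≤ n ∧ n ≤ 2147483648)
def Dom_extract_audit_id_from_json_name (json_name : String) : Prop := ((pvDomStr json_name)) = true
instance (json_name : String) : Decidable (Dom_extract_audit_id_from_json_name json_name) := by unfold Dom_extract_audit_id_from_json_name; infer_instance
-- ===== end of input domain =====

-- B replaces strip/split-and-break tokenization by a single character-level scan (alternative decomposition, same cost).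

-- ===== PORT A =====
-- hand port of str.split('_') (single nonempty ASCII separator); exact: Python split keeps empty segments
def pvSplitU : List Char → List (List Char)
  | [] => [[]]
  | c :: rest =>
    if c = '_' then [] :: pvSplitU rest
    else
      match pvSplitU rest with
      | [] => [[c]]
      | s :: ss => (c :: s) :: ss

-- A's for-loop with break: keep leading parts satisfying part.isdigit()
def pvALoop : List (List Char) → List (List Char)
  | [] => []
  | p :: ps => if PySem.Chars.strIsdigit p then p :: pvALoop ps else []

def extract_audit_id_from_json_name (json_name : String) : Option String :=
  let parts := pvSplitU (PySem.Chars.stripChars json_name.toList ['_'])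
  let id_parts := pvALoop parts
  if 2 ≤ id_parts.length then some (String.mk (PySem.Chars.join ['.'] id_parts)) else none

-- ===== PORT B =====
-- Source B's for-loop over the stripped characters; state = (tokens, cur); break returns with cur cleared
def pvBLoop : List Char → List (List Char) → List Char → (List (List Char) × List Char)
  | [], toks, cur => (toks, cur)
  | c :: cs, toks, cur =>
    if PySem.Chars.isdigit c then pvBLoop cs toks (cur ++ [c])
    else if c = '_' ∧ cur ≠ [] then pvBLoop cs (toks ++ [cur]) []
    else (toks, [])

def extract_audit_id_from_json_name_alt (json_name : String) : Option String :=
  let r := pvBLoop (PySem.Chars.stripChars json_name.toList ['_']) [] []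
  let toks := if r.2 ≠ [] then r.1 ++ [r.2] else r.1
  if 2 ≤ toks.length then some (String.mk (PySem.Chars.join ['.'] toks)) else none

-- ===== PRECONDITION & SPEC =====
def Spec_extract_audit_id_from_json_name (json_name : String) (out : Option String) : Prop := out = extract_audit_id_from_json_name_alt json_name
instance (json_name : String) (out : Option String) : Decidable (Spec_extract_audit_id_from_json_name json_name out) := by unfold Spec_extract_audit_id_from_json_name; infer_instance

-- ===== CLAIM (what is proved, stated in full; the proofs are below) =====
def Claim_equal_extract_audit_id_from_json_name : Prop := ∀ (json_name : String), Dom_extract_audit_id_from_json_name json_name → Spec_extract_audit_id_from_json_name json_name (extract_audit_id_from_json_name json_name)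

-- ===== LEMMAS AND PROOFS =====

-- prepend a partial first token to a split-token list
def pvHeadCons (cur : List Char) : List (List Char) → List (List Char)
  | [] => [cur]
  | s :: ss => (cur ++ s) :: ss

theorem pvSplitU_ne_nil (cs : List Char) : pvSplitU cs ≠ [] := by
  induction cs with
  | nil => simp [pvSplitU]
  | cons c cs ih =>
    simp only [pvSplitU]
    split
    · simp
    · cases h : pvSplitU cs <;> simp

theorem pvHeadCons_nil (l : List (List Char)) (h : l ≠ []) : pvHeadCons [] l = l := by
  cases l with
  | nil => exact absurd rfl h
  | cons s ss => simp [pvHeadCons]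

theorem pvKey (cs : List Char) : ∀ (toks : List (List Char)) (cur : List Char),
    cur.all PySem.Chars.isdigit = true →
    (if (pvBLoop cs toks cur).2 ≠ [] then (pvBLoop cs toks cur).1 ++ [(pvBLoop cs toks cur).2]
     else (pvBLoop cs toks cur).1)
      = toks ++ pvALoop (pvHeadCons cur (pvSplitU cs)) := by
  induction cs with
  | nil =>
    intro toks cur hall
    simp only [pvBLoop, pvSplitU, pvHeadCons, List.append_nil]
    by_cases h : cur = []
    · subst h; simp [pvALoop, PySem.Chars.strIsdigit]
    · simp [h, pvALoop, PySem.Chars.strIsdigit, hall]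
  | cons c cs ih =>
    intro toks cur hall
    by_cases hd : PySem.Chars.isdigit c = true
    · -- digit: extend cur; c is not '_'
      have e : pvBLoop (c :: cs) toks cur = pvBLoop cs toks (cur ++ [c]) := by
        simp only [pvBLoop]; rw [if_pos hd]
      have hne : c ≠ '_' := by
        intro h; subst h; simp [PySem.Chars.isdigit] at hd
      have hall' : (cur ++ [c]).all PySem.Chars.isdigit = true := by
        simp [List.all_append, hall, hd]
      obtain ⟨s, ss, hsp⟩ : ∃ s ss, pvSplitU cs = s :: ss := by
        cases h : pvSplitU cs with
        | nil => exact absurd h (pvSplitU_ne_nil cs)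
        | cons s ss => exact ⟨s, ss, rfl⟩
      rw [e, ih toks (cur ++ [c]) hall']
      simp [pvSplitU, hne, hsp, pvHeadCons]
    · have hd' : PySem.Chars.isdigit c = false := by
        cases h : PySem.Chars.isdigit c
        · rfl
        · exact absurd h hd
      by_cases hu : c = '_'
      · by_cases hc : cur = []
        · -- empty token: break
          have e : pvBLoop (c :: cs) toks cur = (toks, []) := by
            simp only [pvBLoop]; rw [if_neg hd, if_neg (by simp [hc])]
          rw [e]
          subst hu; subst hc
          simp [pvSplitU, pvHeadCons, pvALoop, PySem.Chars.strIsdigit]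
        · -- commit cur
          have e : pvBLoop (c :: cs) toks cur = pvBLoop cs (toks ++ [cur]) [] := by
            simp only [pvBLoop]; rw [if_neg hd, if_pos ⟨hu, hc⟩]
          rw [e, ih (toks ++ [cur]) [] (by simp)]
          subst hu
          rw [pvHeadCons_nil _ (pvSplitU_ne_nil cs)]
          simp [pvSplitU, pvHeadCons, pvALoop, PySem.Chars.strIsdigit, hc, hall]
      · -- non-digit, non-underscore: break; the merged first token is not all digits
        have e : pvBLoop (c :: cs) toks cur = (toks, []) := by
          simp only [pvBLoop]; rw [if_neg hd, if_neg (fun h => hu h.1)]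
        obtain ⟨s, ss, hsp⟩ : ∃ s ss, pvSplitU cs = s :: ss := by
          cases h : pvSplitU cs with
          | nil => exact absurd h (pvSplitU_ne_nil cs)
          | cons s ss => exact ⟨s, ss, rfl⟩
        rw [e]
        simp [pvSplitU, hu, hsp, pvHeadCons, pvALoop, PySem.Chars.strIsdigit,
              List.all_append, hd']

-- ===== VERDICT (by name: the statement is the Claim_ definition above) =====
theorem extract_audit_id_from_json_name_spec : Claim_equal_extract_audit_id_from_json_name := by
  intro json_name _
  unfold Spec_extract_audit_id_from_json_name
  unfold extract_audit_id_from_json_name extract_audit_id_from_json_name_alt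
  have h := pvKey (PySem.Chars.stripChars json_name.toList ['_']) [] [] (by simp)
  rw [pvHeadCons_nil _ (pvSplitU_ne_nil _)] at h
  simp only [List.nil_append] at h
  simp only [← h]
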